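-- pv_equiv track=rewrite | github.com/r12945059/2024_spring_computer_vision_VIVOTEK | Solution/generate_output.py | find_continuous_opens
-- ===== SOURCE A (Python) =====
-- def find_continuous_opens(data):
--     open_ranges = []
--     start = None
--     count_closed = 0
--
--     for i, status in enumerate(data):
--         if status == 'Open':
--             if start is None:
--                 start = i
--             count_closed = 0
--         else:
--             count_closed += 1
--             if count_closed > 2:  # if more than 2 consecutive closed
--                 if start is not None:
--                     open_ranges.append((start, i - count_closed))
--                     start = None
--                 count_closed = 0
--
--     if start is not None:
--         open_ranges.append([start, len(data) - count_closed - 1])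
--
--     return open_ranges
-- ===== SOURCE B (Python) =====
-- def find_continuous_opens(data):
--     opens = [i for i, s in enumerate(data) if s == 'Open']
--     groups = []
--     if opens:
--         first = last = opens[0]
--         for i in opens[1:]:
--             if i - last > 3:  # at least 3 consecutive non-open entries in between
--                 groups.append((first, last))
--                 first = i
--             last = i
--         groups.append((first, last))
--     return groups
-- ===== Notes on version B (the rewrite author's own statement) =====
-- stated objective: alternative
-- what changed: B first collects all 'Open' indices, then groups that index list by gap (>3 apart starts a new group), replacing A's single stateful scan with start/count_closed bookkeeping; B emits every range as a tuple where A emits the trailing range as a two-element list (same pair of ints, identical under the Int x Int convention); same O(n) cost.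
import Mathlib
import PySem

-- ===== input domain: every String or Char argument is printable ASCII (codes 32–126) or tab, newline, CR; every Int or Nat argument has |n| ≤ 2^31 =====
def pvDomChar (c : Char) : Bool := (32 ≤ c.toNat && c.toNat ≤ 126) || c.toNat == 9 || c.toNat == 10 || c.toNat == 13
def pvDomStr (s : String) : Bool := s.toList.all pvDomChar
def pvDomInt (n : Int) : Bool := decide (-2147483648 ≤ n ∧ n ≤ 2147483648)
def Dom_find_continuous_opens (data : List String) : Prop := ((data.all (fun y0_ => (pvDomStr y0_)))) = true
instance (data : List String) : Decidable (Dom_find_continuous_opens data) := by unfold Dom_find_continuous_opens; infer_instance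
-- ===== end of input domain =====

-- B collects the 'Open' indices first and groups them by gap, instead of A's single
-- stateful scan; same ranges, alternative decomposition (no speed claim).
-- A (Python) emits its trailing range as a two-element list and the others as tuples;
-- B emits tuples throughout — the same pair of ints, one Int × Int value here.

-- ===== PORT A =====
-- enumerate(data) ported by hand as an index-carrying fold (exact: indices 0,1,2,…).
-- A's loop body, step for step (state: open_ranges, start, count_closed).
def stepA (st : List (Int × Int) × Option Int × Int) (i : Int) (status : String) :
    List (Int × Int) × Option Int × Int :=
  let (acc, start, cc) := st
  if status == "Open" then
    match start with
    | none => (acc, some i, 0)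
    | some _ => (acc, start, 0)
  else
    let cc := cc + 1
    if cc > 2 then
      match start with
      | some s => (acc ++ [(s, i - cc)], none, 0)
      | none => (acc, none, 0)
    else (acc, start, cc)

def loopA (i : Int) (st : List (Int × Int) × Option Int × Int) :
    List String → List (Int × Int) × Option Int × Int
  | [] => st
  | status :: rest => loopA (i + 1) (stepA st i status) rest

def find_continuous_opens (data : List String) : List (Int × Int) :=
  let st := loopA 0 ([], none, 0) data
  match st with
  | (acc, some s, cc) => acc ++ [(s, (data.length : Int) - cc - 1)]
  | (acc, none, _) => acc

-- ===== PORT B =====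
-- opens = [i for i, s in enumerate(data) if s == 'Open']  (hand-ported enumerate, exact)
def opensFrom (i : Int) : List String → List Int
  | [] => []
  | s :: rest => if s == "Open" then i :: opensFrom (i + 1) rest else opensFrom (i + 1) rest

-- the grouping loop over opens[1:] (state: groups, first, last)
def stepB (st : List (Int × Int) × Int × Int) (i : Int) : List (Int × Int) × Int × Int :=
  let (groups, first, last) := st
  if i - last > 3 then (groups ++ [(first, last)], i, i) else (groups, first, i)

def find_continuous_opens_alt (data : List String) : List (Int × Int) :=
  match opensFrom 0 data with
  | [] => []
  | f :: rest =>
    let (groups, first, last) := rest.foldl stepB ([], f, f)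
    groups ++ [(first, last)]

-- ===== PRECONDITION & SPEC =====
def Spec_find_continuous_opens (data : List String) (out : List (Int × Int)) : Prop := out = find_continuous_opens_alt data
instance (data : List String) (out : List (Int × Int)) : Decidable (Spec_find_continuous_opens data out) := by unfold Spec_find_continuous_opens; infer_instance

-- ===== CLAIM (what is proved, stated in full; the proofs are below) =====
def Claim_equal_find_continuous_opens : Prop := ∀ (data : List String), Dom_find_continuous_opens data → Spec_find_continuous_opens data (find_continuous_opens data)

-- ===== LEMMAS AND PROOFS =====

-- recursive form of B's grouping, front-to-back
def groupGo : List Int → Int → Int → List (Int × Int)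
  | [], f, l => [(f, l)]
  | i :: r, f, l => if i - l > 3 then (f, l) :: groupGo r i i else groupGo r f i

def bFrom : List Int → List (Int × Int)
  | [] => []
  | f :: r => groupGo r f f

-- A's final step, with N the length of data
def finalA (st : List (Int × Int) × Option Int × Int) (N : Int) : List (Int × Int) :=
  match st with
  | (acc, some s, cc) => acc ++ [(s, N - cc - 1)]
  | (acc, none, _) => acc

theorem foldl_stepB_groupGo (opens : List Int) (g : List (Int × Int)) (f l : Int) :
    (let (g', f', l') := opens.foldl stepB (g, f, l); g' ++ [(f', l')]) = g ++ groupGo opens f l := by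
  induction opens generalizing g f l with
  | nil => simp [groupGo]
  | cons i r ih =>
    simp only [List.foldl_cons, stepB, groupGo]
    split_ifs with h <;> simp [ih, List.append_assoc]

theorem opensFrom_ge (i : Int) (data : List String) : ∀ x ∈ opensFrom i data, i ≤ x := by
  induction data generalizing i with
  | nil => simp [opensFrom]
  | cons s rest ih =>
    intro x hx
    simp only [opensFrom] at hx
    split_ifs at hx with h
    · rcases List.mem_cons.1 hx with rfl | hx
      · exact le_refl x
      · have := ih (i + 1) x hx; omega
    · have := ih (i + 1) x hx; omega

-- flushing at a 3-closed run: every later open is > last + 3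
theorem groupGo_far (opens : List Int) (f l : Int)
    (hfar : ∀ x ∈ opens, l + 3 < x) : groupGo opens f l = (f, l) :: bFrom opens := by
  cases opens with
  | nil => simp [groupGo, bFrom]
  | cons i r =>
    have : i - l > 3 := by have := hfar i (by simp); omega
    simp [groupGo, bFrom, this]

-- the joint loop invariant: A's scan, from any reachable state, produces what B's
-- grouping of the remaining open indices produces.
theorem loopA_inv (rest : List String) :
    (∀ (i0 : Int) (acc : List (Int × Int)) (cc : Int),
      finalA (loopA i0 (acc, none, cc) rest) (i0 + rest.length) = acc ++ bFrom (opensFrom i0 rest))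
    ∧
    (∀ (i0 : Int) (acc : List (Int × Int)) (f l : Int), l + 1 ≤ i0 → i0 ≤ l + 3 →
      finalA (loopA i0 (acc, some f, i0 - l - 1) rest) (i0 + rest.length) = acc ++ groupGo (opensFrom i0 rest) f l) := by
  induction rest with
  | nil =>
    constructor
    · intro i0 acc cc; simp [loopA, finalA, opensFrom, bFrom]
    · intro i0 acc f l h1 h2
      simp only [loopA, finalA, opensFrom, groupGo]
      have : i0 + (List.length ([] : List String) : Int) - (i0 - l - 1) - 1 = l := by
        simp; omega
      rw [this]
  | cons s rest ih =>
    obtain ⟨ihn, ihs⟩ := ih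
    constructor
    · intro i0 acc cc
      simp only [loopA, stepA]
      by_cases hs : s == "Open"
      · simp only [hs, reduceIte]
        have := ihs (i0 + 1) acc i0 i0 (by omega) (by omega)
        simp only [show i0 + 1 - i0 - 1 = (0 : Int) by omega] at this
        simp only [opensFrom, hs, reduceIte, List.length_cons, bFrom]
        rw [show (i0 : Int) + ((rest.length + 1 : Nat) : Int) = i0 + 1 + rest.length by push_cast; ring]
        exact this
      · have hs' : (s == "Open") = false := by simpa using hs
        simp only [hs', Bool.false_eq_true, reduceIte, opensFrom, List.length_cons]
        rw [show (i0 : Int) + ((rest.length + 1 : Nat) : Int) = i0 + 1 + rest.length by push_cast; ring]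
        by_cases hcc : cc + 1 > 2
        · simp only [if_pos hcc]; exact ihn (i0 + 1) acc 0
        · simp only [if_neg hcc]; exact ihn (i0 + 1) acc (cc + 1)
    · intro i0 acc f l h1 h2
      simp only [loopA, stepA, List.length_cons]
      rw [show (i0 : Int) + ((rest.length + 1 : Nat) : Int) = i0 + 1 + rest.length by push_cast; ring]
      by_cases hs : s == "Open"
      · simp only [hs, reduceIte]
        have := ihs (i0 + 1) acc f i0 (by omega) (by omega)
        simp only [show i0 + 1 - i0 - 1 = (0 : Int) by omega] at this
        simp only [opensFrom, hs, reduceIte]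
        rw [show groupGo (i0 :: opensFrom (i0 + 1) rest) f l = groupGo (opensFrom (i0 + 1) rest) f i0 by
          simp [groupGo, show ¬ (i0 - l > 3) by omega]]
        exact this
      · have hs' : (s == "Open") = false := by simpa using hs
        simp only [hs', Bool.false_eq_true, reduceIte, opensFrom]
        by_cases hcc : i0 - l - 1 + 1 > 2
        · have hl3 : i0 = l + 3 := by omega
          simp only [if_pos hcc]
          have hfar : ∀ x ∈ opensFrom (i0 + 1) rest, l + 3 < x := by
            intro x hx; have := opensFrom_ge (i0 + 1) rest x hx; omega
          rw [groupGo_far _ f l hfar]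
          rw [show i0 - (i0 - l - 1 + 1) = l by omega]
          have := ihn (i0 + 1) (acc ++ [(f, l)]) 0
          rw [this, List.append_assoc]; rfl
        · simp only [if_neg hcc]
          have := ihs (i0 + 1) acc f l (by omega) (by omega)
          rw [show i0 + 1 - l - 1 = i0 - l - 1 + 1 by omega] at this
          exact this

-- ===== VERDICT (by name: the statement is the Claim_ definition above) =====
theorem find_continuous_opens_spec : Claim_equal_find_continuous_opens := by
  intro data _
  show find_continuous_opens data = find_continuous_opens_alt data
  have hA : find_continuous_opens data = finalA (loopA 0 ([], none, 0) data) (0 + data.length) := by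
    simp only [find_continuous_opens, finalA, zero_add]
  rw [hA, (loopA_inv data).1 0 [] 0]
  simp only [find_continuous_opens_alt]
  cases h : opensFrom 0 data with
  | nil => simp [bFrom]
  | cons f r =>
    simp only [bFrom]
    have := foldl_stepB_groupGo r [] f f
    rcases hst : r.foldl stepB ([], f, f) with ⟨g', f', l'⟩
    rw [hst] at this
    simp only at this
    exact this.symm
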